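-- pv_equiv track=rewrite | github.com/connorferster/handcalcs | handcalcs/__init__.py | discount_fraction_chars
-- ===== SOURCE A (Python) =====
-- from collections import deque
--
-- def count_fraction_chars(flattened_deque: deque) -> deque:
--     """
--     Returns a deque representing the character counts in 'd' that belong
--     within a fraction.
--     """
--     frac_stack = deque([])
--     count_stack = deque([])
--     equals = 0
--     for idx, component in enumerate(flattened_deque):
--         component = str(component)
--         if "=" in str(component):
--             equals += 1
--             continue
--         if 1 <= equals <= 2:
--             if "{" in component and "_" not in component and "}" not in component:
--                 if component == "\\frac{":
--                     frac_stack.append(1)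
--                     count_stack.append("Numerator")
--                 else:
--                     frac_stack.append(0)
--             elif component == "}{":
--                 count_stack.append("End")
--                 count_stack.append("Denominator")
--             elif "}" in component and "{" not in component:
--                 frac_end_trigger = frac_stack.pop()
--                 if frac_end_trigger:
--                     count_stack.append("End")
--             else:
--                 if "_" in component:
--                     if "\\" not in component:
--                         split_subs = (
--                             component.replace("{", "").replace("}", "").split("_")
--                         )
--                         count_stack.append(len("".join(split_subs)))
--                     else:
--                         split_subs = (
--                             component.replace("{", "").replace("}", "").split("_")
--                         )
--                         count_stack.append(len("".join(split_subs[1:])) + 1)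
--                 elif "\\" in component:
--                     if component == "\\cdot":
--                         count_stack.append(1)
--                     elif component == "\\pi":
--                         count_stack.append(1)
--                     elif "operatorname" in component:
--                         func_name = component.replace("\\operatorname{", "").replace(
--                             "}", ""
--                         )
--                         count_stack.append(len(func_name))
--                 else:
--                     count_stack.append(len(component))
--     return count_stack
--
-- def discount_fraction_chars(flattened_deque: deque) -> int:
--     """
--     Returns an int representing the number of chars
--
--     @param d:
--     @return:
--     """
--     frac_counts = count_fraction_chars(flattened_deque)
--     tally = 0
--     num_count = 0
--     denom_count = 0
--     in_num = False
--     in_denom = False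
--     for item in frac_counts:
--         if item == "Numerator":
--             in_num = True
--             if num_count > denom_count:
--                 tally += num_count - denom_count
--             elif num_count < denom_count:
--                 tally += denom_count - num_count
--             else:
--                 tally += num_count
--             num_count = 0
--         elif item == "Denominator":
--             denom_count = 0
--         elif item == "End":
--             if in_num:
--                 in_num = False
--             elif in_denom:
--                 in_denom = False
--             continue
--         else:
--             if in_num:
--                 num_count += item
--             elif in_denom:
--                 denom_count += item
--     return tally
-- ===== SOURCE B (Python) =====
-- def _token_count(s):
--     """Character count contributed by a plain token, or None if it contributes nothing."""
--     if "_" in s: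
--         stripped = s.replace("{", "").replace("}", "")
--         parts = stripped.split("_")
--         if "\\" in s:
--             return len("".join(parts[1:])) + 1
--         return len("".join(parts))
--     if "\\" in s:
--         if s in ("\\cdot", "\\pi"):
--             return 1
--         if "operatorname" in s:
--             return len(s.replace("\\operatorname{", "").replace("}", ""))
--         return None
--     return len(s)
--
-- def discount_fraction_chars(flattened_deque) -> int:
--     """Single fused pass: no intermediate marker deque, no denominator bookkeeping."""
--     equals = 0
--     frac_stack = []
--     in_num = False
--     num_count = 0
--     tally = 0
--     for component in flattened_deque:
--         s = str(component)
--         if "=" in s: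
--             equals += 1
--             continue
--         if not (1 <= equals <= 2):
--             continue
--         if "{" in s and "_" not in s and "}" not in s:
--             if s == "\\frac{":
--                 tally += num_count
--                 num_count = 0
--                 in_num = True
--                 frac_stack.append(True)
--             else:
--                 frac_stack.append(False)
--         elif s == "}{":
--             in_num = False
--         elif "}" in s and "{" not in s:
--             if frac_stack.pop():
--                 in_num = False
--         elif in_num:
--             c = _token_count(s)
--             if c is not None:
--                 num_count += c
--     return tally
-- ===== Notes on version B (the rewrite author's own statement) =====
-- stated objective: simpler
-- what changed: Fuses A's two passes into one loop over the tokens: instead of building an intermediate deque of markers/counts and folding over it, B applies the second pass's action immediately, and drops the denominator counter and in_denom flag, which an invariant shows are always 0/False, so the symmetric-difference tally reduces to tally += num_count.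
import Mathlib
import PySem

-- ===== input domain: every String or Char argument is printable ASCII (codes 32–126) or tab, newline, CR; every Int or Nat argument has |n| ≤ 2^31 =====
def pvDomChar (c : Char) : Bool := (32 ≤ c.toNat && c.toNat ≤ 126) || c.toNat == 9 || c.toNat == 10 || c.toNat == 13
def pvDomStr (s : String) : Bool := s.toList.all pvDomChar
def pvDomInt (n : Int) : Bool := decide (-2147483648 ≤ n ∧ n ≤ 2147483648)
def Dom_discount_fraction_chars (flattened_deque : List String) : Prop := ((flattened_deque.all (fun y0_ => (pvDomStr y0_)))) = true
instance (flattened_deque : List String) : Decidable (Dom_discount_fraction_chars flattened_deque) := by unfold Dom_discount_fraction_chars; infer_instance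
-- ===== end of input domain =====

-- B fuses A's two passes into one loop (no intermediate marker deque, no denominator
-- bookkeeping, which an invariant shows is dead); objective: simpler.


-- ===== PORT A =====
-- count_stack holds strings ("Numerator"/"End"/"Denominator") and ints: a tagged union.
inductive FracItem where
  | numerator | denominator | endm | cnt (n : Int)
deriving DecidableEq, Repr

-- first pass (count_fraction_chars); none = IndexError from frac_stack.pop() on empty
def countFracGo : List String → Int → List Int → List FracItem → Option (List FracItem)
  | [], _, _, acc => some acc
  | s :: rest, equals, fracStack, acc =>
    if PySem.Str.isIn "=" s then countFracGo rest (equals + 1) fracStack acc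
    else if 1 ≤ equals ∧ equals ≤ 2 then
      if PySem.Str.isIn "{" s && !(PySem.Str.isIn "_" s) && !(PySem.Str.isIn "}" s) then
        if s = "\\frac{" then countFracGo rest equals (fracStack ++ [1]) (acc ++ [.numerator])
        else countFracGo rest equals (fracStack ++ [0]) acc
      else if s = "}{" then countFracGo rest equals fracStack (acc ++ [.endm, .denominator])
      else if PySem.Str.isIn "}" s && !(PySem.Str.isIn "{" s) then
        match fracStack.getLast? with
        | none => none
        | some fracEndTrigger =>
          if fracEndTrigger ≠ 0 then countFracGo rest equals fracStack.dropLast (acc ++ [.endm])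
          else countFracGo rest equals fracStack.dropLast acc
      else
        if PySem.Str.isIn "_" s then
          if !(PySem.Str.isIn "\\" s) then
            countFracGo rest equals fracStack (acc ++ [.cnt (PySem.Str.len (PySem.Str.join ""
              ((PySem.Str.split? (PySem.Str.replace (PySem.Str.replace s "{" "") "}" "") "_").getD [])))])
          else
            countFracGo rest equals fracStack (acc ++ [.cnt (PySem.Str.len (PySem.Str.join ""
              (((PySem.Str.split? (PySem.Str.replace (PySem.Str.replace s "{" "") "}" "") "_").getD []).drop 1)) + 1)])
        else if PySem.Str.isIn "\\" s then
          if s = "\\cdot" then countFracGo rest equals fracStack (acc ++ [.cnt 1])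
          else if s = "\\pi" then countFracGo rest equals fracStack (acc ++ [.cnt 1])
          else if PySem.Str.isIn "operatorname" s then
            countFracGo rest equals fracStack (acc ++ [.cnt (PySem.Str.len
              (PySem.Str.replace (PySem.Str.replace s "\\operatorname{" "") "}" ""))])
          else countFracGo rest equals fracStack acc
        else countFracGo rest equals fracStack (acc ++ [.cnt (PySem.Str.len s)])
    else countFracGo rest equals fracStack acc

-- second pass of A, one step; state = (tally, num_count, denom_count, in_num, in_denom)
def phase2Step : (Int × Int × Int × Bool × Bool) → FracItem → (Int × Int × Int × Bool × Bool)
  | (tally, num, denom, _, inDenom), .numerator =>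
      (tally + (if num > denom then num - denom else if num < denom then denom - num else num),
       0, denom, true, inDenom)
  | (tally, num, _, inNum, inDenom), .denominator => (tally, num, 0, inNum, inDenom)
  | (tally, num, denom, inNum, inDenom), .endm =>
      if inNum then (tally, num, denom, false, inDenom)
      else if inDenom then (tally, num, denom, inNum, false)
      else (tally, num, denom, inNum, inDenom)
  | (tally, num, denom, inNum, inDenom), .cnt c =>
      if inNum then (tally, num + c, denom, inNum, inDenom)
      else if inDenom then (tally, num, denom + c, inNum, inDenom)
      else (tally, num, denom, inNum, inDenom)

def discount_fraction_chars (flattened_deque : List String) : Int :=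
  match countFracGo flattened_deque 0 [] [] with
  | none => 0   -- Python raises IndexError here; excluded by Pre_
  | some fracCounts => (fracCounts.foldl phase2Step (0, 0, 0, false, false)).1

-- ===== PORT B =====
def tokenCount (s : String) : Option Int :=
  if PySem.Str.isIn "_" s then
    let stripped := PySem.Str.replace (PySem.Str.replace s "{" "") "}" ""
    let parts := (PySem.Str.split? stripped "_").getD []
    if PySem.Str.isIn "\\" s then some (PySem.Str.len (PySem.Str.join "" (parts.drop 1)) + 1)
    else some (PySem.Str.len (PySem.Str.join "" parts))
  else if PySem.Str.isIn "\\" s then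
    if s = "\\cdot" ∨ s = "\\pi" then some 1
    else if PySem.Str.isIn "operatorname" s then
      some (PySem.Str.len (PySem.Str.replace (PySem.Str.replace s "\\operatorname{" "") "}" ""))
    else none
  else some (PySem.Str.len s)

def altGo : List String → Int → List Bool → Bool → Int → Int → Int
  | [], _, _, _, _, tally => tally
  | s :: rest, equals, fracStack, inNum, numCount, tally =>
    if PySem.Str.isIn "=" s then altGo rest (equals + 1) fracStack inNum numCount tally
    else if ¬ (1 ≤ equals ∧ equals ≤ 2) then altGo rest equals fracStack inNum numCount tally
    else if PySem.Str.isIn "{" s && !(PySem.Str.isIn "_" s) && !(PySem.Str.isIn "}" s) then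
      if s = "\\frac{" then altGo rest equals (fracStack ++ [true]) true 0 (tally + numCount)
      else altGo rest equals (fracStack ++ [false]) inNum numCount tally
    else if s = "}{" then altGo rest equals fracStack false numCount tally
    else if PySem.Str.isIn "}" s && !(PySem.Str.isIn "{" s) then
      match fracStack.getLast? with
      | none => tally   -- Python raises IndexError here; excluded by Pre_
      | some b => altGo rest equals fracStack.dropLast (if b then false else inNum) numCount tally
    else if inNum then
      match tokenCount s with
      | some c => altGo rest equals fracStack inNum (numCount + c) tally
      | none => altGo rest equals fracStack inNum numCount tally
    else altGo rest equals fracStack inNum numCount tally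

def discount_fraction_chars_alt (flattened_deque : List String) : Int :=
  altGo flattened_deque 0 [] false 0 0

-- ===== PRECONDITION & SPEC =====
-- Pre_ excludes exactly the inputs on which Python A raises IndexError (frac_stack.pop()
-- on an empty stack): a brace-balance shape condition — while 1 ≤ #'='-tokens-seen ≤ 2,
-- closing-brace tokens never outnumber the opening-brace tokens before them.
def popsOk : List String → Int → Nat → Bool
  | [], _, _ => true
  | s :: rest, equals, depth =>
    if PySem.Str.isIn "=" s then popsOk rest (equals + 1) depth
    else if 1 ≤ equals ∧ equals ≤ 2 then
      if PySem.Str.isIn "{" s && !(PySem.Str.isIn "_" s) && !(PySem.Str.isIn "}" s) then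
        popsOk rest equals (depth + 1)
      else if s = "}{" then popsOk rest equals depth
      else if PySem.Str.isIn "}" s && !(PySem.Str.isIn "{" s) then
        decide (0 < depth) && popsOk rest equals (depth - 1)
      else popsOk rest equals depth
    else popsOk rest equals depth

def Pre_discount_fraction_chars (flattened_deque : List String) : Prop :=
  popsOk flattened_deque 0 0 = true
instance (flattened_deque : List String) : Decidable (Pre_discount_fraction_chars flattened_deque) := by
  unfold Pre_discount_fraction_chars; infer_instance

def pvWitness_discount_fraction_chars : List String :=
  ["a=b", "\\frac{", "x", "}{", "y2", "}", "\\frac{", "\\pi", "}{", "2", "}"]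

def Spec_discount_fraction_chars (flattened_deque : List String) (out : Int) : Prop := out = discount_fraction_chars_alt flattened_deque
instance (flattened_deque : List String) (out : Int) : Decidable (Spec_discount_fraction_chars flattened_deque out) := by unfold Spec_discount_fraction_chars; infer_instance

-- ===== CLAIM (what is proved, stated in full; the proofs are below) =====
def Claim_equal_discount_fraction_chars : Prop := ∀ (flattened_deque : List String), Dom_discount_fraction_chars flattened_deque → Pre_discount_fraction_chars flattened_deque → Spec_discount_fraction_chars flattened_deque (discount_fraction_chars flattened_deque)

-- ===== LEMMAS AND PROOFS =====

-- single phase2Step computations on A's reachable states (denom = 0, in_denom = false)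
theorem stepNum (tally num : Int) (inNum : Bool) (h : 0 ≤ num) :
    phase2Step (tally, num, 0, inNum, false) .numerator = (tally + num, 0, 0, true, false) := by
  simp only [phase2Step, Prod.mk.injEq]
  split_ifs <;> simp <;> omega

theorem stepEnd (tally num : Int) (inNum : Bool) :
    phase2Step (tally, num, 0, inNum, false) .endm = (tally, num, 0, false, false) := by
  cases inNum <;> rfl

theorem stepCnt (tally num c : Int) (inNum : Bool) :
    phase2Step (tally, num, 0, inNum, false) (.cnt c)
      = (tally, if inNum then num + c else num, 0, inNum, false) := by
  cases inNum <;> rfl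

-- shared shape of the five count-emitting branches
theorem emit_branch {rest : List String} {equals : Int} {fracStack : List Int}
    {acc : List FracItem} {tally num C : Int} {inNum : Bool}
    (ih : ∀ (equals : Int) (fracStack : List Int) (acc : List FracItem)
      (tally num : Int) (inNum : Bool),
      popsOk rest equals fracStack.length = true → 0 ≤ num →
      acc.foldl phase2Step (0, 0, 0, false, false) = (tally, num, 0, inNum, false) →
      ∃ items, countFracGo rest equals fracStack acc = some items ∧
        (items.foldl phase2Step (0, 0, 0, false, false)).1
          = altGo rest equals (fracStack.map (fun i => decide (i ≠ 0))) inNum num tally)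
    (hpops : popsOk rest equals fracStack.length = true) (hnum : 0 ≤ num)
    (hacc : acc.foldl phase2Step (0, 0, 0, false, false) = (tally, num, 0, inNum, false))
    (hC : 0 ≤ C) :
    ∃ items, countFracGo rest equals fracStack (acc ++ [.cnt C]) = some items ∧
      (items.foldl phase2Step (0, 0, 0, false, false)).1
        = if inNum = true
          then altGo rest equals (fracStack.map (fun i => decide (i ≠ 0))) inNum (num + C) tally
          else altGo rest equals (fracStack.map (fun i => decide (i ≠ 0))) inNum num tally := by
  obtain ⟨items, hi, he⟩ := ih equals fracStack (acc ++ [.cnt C]) tally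
    (if inNum then num + C else num) inNum hpops
    (by cases inNum <;> simp <;> omega)
    (by rw [List.foldl_append, hacc]
        simpa using stepCnt tally num C inNum)
  refine ⟨items, hi, ?_⟩
  rw [he]; cases inNum <;> simp

-- Invariant-carrying simulation: A's deferred second pass, run over what the first pass
-- has emitted so far (acc), tracks B's fused single-pass state.
set_option maxHeartbeats 1000000 in
theorem countFrac_sim : ∀ (rest : List String) (equals : Int) (fracStack : List Int)
    (acc : List FracItem) (tally num : Int) (inNum : Bool),
    popsOk rest equals fracStack.length = true → 0 ≤ num →
    acc.foldl phase2Step (0, 0, 0, false, false) = (tally, num, 0, inNum, false) →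
    ∃ items, countFracGo rest equals fracStack acc = some items ∧
      (items.foldl phase2Step (0, 0, 0, false, false)).1
        = altGo rest equals (fracStack.map (fun i => decide (i ≠ 0))) inNum num tally := by
  intro rest
  induction rest with
  | nil =>
    intro equals fracStack acc tally num inNum _ _ hacc
    exact ⟨acc, rfl, by simp [altGo, hacc]⟩
  | cons s rest ih =>
    intro equals fracStack acc tally num inNum hpops hnum hacc
    simp only [countFracGo, altGo, popsOk] at hpops ⊢
    by_cases h1 : PySem.Str.isIn "=" s = true
    · simp only [h1, reduceIte] at hpops ⊢
      exact ih (equals + 1) fracStack acc tally num inNum hpops hnum hacc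
    · simp only [h1, reduceIte, Bool.false_eq_true, if_false] at hpops ⊢
      by_cases h2 : (1 : Int) ≤ equals ∧ equals ≤ 2
      · simp only [h2, and_self, not_true, reduceIte, if_true] at hpops ⊢
        by_cases h3 : (PySem.Str.isIn "{" s && !(PySem.Str.isIn "_" s) && !(PySem.Str.isIn "}" s)) = true
        · simp only [h3, reduceIte] at hpops ⊢
          by_cases h4 : s = "\\frac{"
          · simp only [h4, reduceIte] at hpops ⊢
            obtain ⟨items, hi, he⟩ := ih equals (fracStack ++ [1]) (acc ++ [.numerator])
              (tally + num) 0 true (by simpa using hpops) le_rfl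
              (by rw [List.foldl_append, hacc]; simpa using stepNum tally num inNum hnum)
            refine ⟨items, hi, ?_⟩
            rw [he]; simp
          · simp only [h4, reduceIte] at hpops ⊢
            obtain ⟨items, hi, he⟩ := ih equals (fracStack ++ [0]) acc
              tally num inNum (by simpa using hpops) hnum hacc
            refine ⟨items, hi, ?_⟩
            rw [he]; simp
        · simp only [h3, Bool.false_eq_true, reduceIte] at hpops ⊢
          by_cases h5 : s = "}{"
          · simp only [h5, reduceIte] at hpops ⊢
            obtain ⟨items, hi, he⟩ := ih equals fracStack (acc ++ [.endm, .denominator])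
              tally num false hpops hnum
              (by rw [List.foldl_append, hacc]
                  simp only [List.foldl_cons, List.foldl_nil, stepEnd]
                  rfl)
            exact ⟨items, hi, he⟩
          · simp only [h5, reduceIte] at hpops ⊢
            by_cases h6 : (PySem.Str.isIn "}" s && !(PySem.Str.isIn "{" s)) = true
            · simp only [h6, reduceIte] at hpops ⊢
              rw [Bool.and_eq_true, decide_eq_true_eq] at hpops
              obtain ⟨hlen, hpops⟩ := hpops
              have hne : fracStack ≠ [] := by
                intro h; rw [h] at hlen; simp at hlen
              obtain ⟨t, ht⟩ : ∃ t, fracStack.getLast? = some t := by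
                cases h : fracStack.getLast? with
                | none => exact absurd (List.getLast?_eq_none_iff.mp h) hne
                | some t => exact ⟨t, rfl⟩
              have hlast : (fracStack.map (fun i => decide (i ≠ 0))).getLast?
                  = some (decide (t ≠ 0)) := by
                rw [List.getLast?_map, ht]; rfl
              rw [ht, hlast]
              have hpops' : popsOk rest equals fracStack.dropLast.length = true := by
                simpa [List.length_dropLast] using hpops
              by_cases ht0 : t = 0
              · simp only [ht0, ne_eq, not_true, reduceIte, decide_false]
                obtain ⟨items, hi, he⟩ := ih equals fracStack.dropLast acc
                  tally num inNum hpops' hnum hacc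
                refine ⟨items, hi, ?_⟩
                rw [he, List.map_dropLast]
                simp
              · simp only [ne_eq, ht0, not_false_iff, reduceIte, decide_true]
                obtain ⟨items, hi, he⟩ := ih equals fracStack.dropLast (acc ++ [.endm])
                  tally num false hpops' hnum
                  (by rw [List.foldl_append, hacc]
                      simpa using stepEnd tally num inNum)
                refine ⟨items, hi, ?_⟩
                rw [he, List.map_dropLast]
            · simp only [h6, Bool.false_eq_true, reduceIte] at hpops ⊢
              by_cases h7 : PySem.Str.isIn "_" s = true
              · by_cases h8 : PySem.Str.isIn "\\" s = true
                · have htc : tokenCount s = some (PySem.Str.len (PySem.Str.join ""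
                      (((PySem.Str.split? (PySem.Str.replace (PySem.Str.replace s "{" "") "}" "") "_").getD []).drop 1)) + 1) := by
                    simp only [tokenCount]; rw [if_pos h7, if_pos h8]
                  simp only [h7, h8, Bool.not_true, Bool.false_eq_true, reduceIte, htc]
                  exact emit_branch ih hpops hnum hacc
                    (by have := PySem.Str.len_eq (PySem.Str.join ""
                          (((PySem.Str.split? (PySem.Str.replace (PySem.Str.replace s "{" "") "}" "") "_").getD []).drop 1))
                        omega)
                · have h8' : PySem.Str.isIn "\\" s = false := by
                    revert h8; cases PySem.Str.isIn "\\" s <;> simp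
                  have htc : tokenCount s = some (PySem.Str.len (PySem.Str.join ""
                      ((PySem.Str.split? (PySem.Str.replace (PySem.Str.replace s "{" "") "}" "") "_").getD []))) := by
                    simp only [tokenCount]; rw [if_pos h7, if_neg h8]
                  simp only [h7, h8', Bool.not_false, reduceIte, htc]
                  exact emit_branch ih hpops hnum hacc
                    (by have := PySem.Str.len_eq (PySem.Str.join ""
                          ((PySem.Str.split? (PySem.Str.replace (PySem.Str.replace s "{" "") "}" "") "_").getD []))
                        omega)
              · have h7' : PySem.Str.isIn "_" s = false := by
                  revert h7; cases PySem.Str.isIn "_" s <;> simp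
                simp only [h7', Bool.false_eq_true, reduceIte]
                by_cases h9 : PySem.Str.isIn "\\" s = true
                · simp only [h9, reduceIte]
                  by_cases h10 : s = "\\cdot"
                  · have htc : tokenCount s = some 1 := by
                      simp only [tokenCount]
                      rw [if_neg h7, if_pos h9, if_pos (Or.inl h10)]
                    simp only [h10, reduceIte]
                    exact emit_branch ih hpops hnum hacc (by norm_num)
                  · simp only [h10, reduceIte]
                    by_cases h11 : s = "\\pi"
                    · have htc : tokenCount s = some 1 := by
                        simp only [tokenCount]
                        rw [if_neg h7, if_pos h9, if_pos (Or.inr h11)]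
                      simp only [h11, reduceIte]
                      exact emit_branch ih hpops hnum hacc (by norm_num)
                    · simp only [h11, reduceIte]
                      by_cases h12 : PySem.Str.isIn "operatorname" s = true
                      · have htc : tokenCount s = some (PySem.Str.len
                            (PySem.Str.replace (PySem.Str.replace s "\\operatorname{" "") "}" "")) := by
                          simp only [tokenCount]
                          rw [if_neg h7, if_pos h9, if_neg (by tauto), if_pos h12]
                        simp only [h12, reduceIte, htc]
                        exact emit_branch ih hpops hnum hacc
                          (by have := PySem.Str.len_eq
                                (PySem.Str.replace (PySem.Str.replace s "\\operatorname{" "") "}" "")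
                              omega)
                      · have h12' : PySem.Str.isIn "operatorname" s = false := by
                          revert h12; cases PySem.Str.isIn "operatorname" s <;> simp
                        have htc : tokenCount s = none := by
                          simp only [tokenCount]
                          rw [if_neg h7, if_pos h9, if_neg (by tauto), if_neg h12]
                        simp only [h12', Bool.false_eq_true, reduceIte, htc]
                        obtain ⟨items, hi, he⟩ := ih equals fracStack acc tally num inNum hpops hnum hacc
                        refine ⟨items, hi, ?_⟩
                        rw [he]; cases inNum <;> simp
                · have h9' : PySem.Str.isIn "\\" s = false := by
                    revert h9; cases PySem.Str.isIn "\\" s <;> simp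
                  have htc : tokenCount s = some (PySem.Str.len s) := by
                    simp only [tokenCount]
                    rw [if_neg h7, if_neg h9]
                  simp only [h9', Bool.false_eq_true, reduceIte, htc]
                  exact emit_branch ih hpops hnum hacc
                    (by have := PySem.Str.len_eq s; omega)
      · rw [if_neg h2] at hpops
        rw [if_neg h2, if_pos h2]
        exact ih equals fracStack acc tally num inNum hpops hnum hacc

-- ===== VERDICT (by name: the statement is the Claim_ definition above) =====
theorem discount_fraction_chars_spec : Claim_equal_discount_fraction_chars := by
  intro fd _ hpre
  unfold Spec_discount_fraction_chars discount_fraction_chars discount_fraction_chars_alt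
  obtain ⟨items, hsome, heq⟩ := countFrac_sim fd 0 [] [] 0 0 false hpre le_rfl rfl
  rw [hsome]
  simpa using heq
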